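-- pv_equiv track=rewrite | github.com/AdamZink/frequency-finder | score.py | get_ordered_tuples
-- ===== SOURCE A (Python) =====
-- def get_ordered_tuples(sums):
--     # map of sum value -> index
--     sum_map = {}
--     for i in range(len(sums)):
--         if sums[i] not in sum_map:
--             sum_map[sums[i]] = []
--         sum_map[sums[i]].append(i)
--
--     tuples = []
--     for value in sorted(list(sum_map), reverse=True):
--         tuple_list = [(value, index) for index in sum_map[value]]
--         tuples += tuple_list
--
--     return tuples
-- ===== SOURCE B (Python) =====
-- def get_ordered_tuples(sums):
--     pairs = [(value, index) for index, value in enumerate(sums)]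
--     return sorted(pairs, key=lambda p: -p[0])
-- ===== Notes on version B (the rewrite author's own statement) =====
-- stated objective: simpler
-- what changed: B drops A's dict-of-buckets grouping and second pass entirely: it builds (value, index) pairs with enumerate and does one stable sort keyed on -value, which preserves ascending index order on ties.
import Mathlib
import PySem

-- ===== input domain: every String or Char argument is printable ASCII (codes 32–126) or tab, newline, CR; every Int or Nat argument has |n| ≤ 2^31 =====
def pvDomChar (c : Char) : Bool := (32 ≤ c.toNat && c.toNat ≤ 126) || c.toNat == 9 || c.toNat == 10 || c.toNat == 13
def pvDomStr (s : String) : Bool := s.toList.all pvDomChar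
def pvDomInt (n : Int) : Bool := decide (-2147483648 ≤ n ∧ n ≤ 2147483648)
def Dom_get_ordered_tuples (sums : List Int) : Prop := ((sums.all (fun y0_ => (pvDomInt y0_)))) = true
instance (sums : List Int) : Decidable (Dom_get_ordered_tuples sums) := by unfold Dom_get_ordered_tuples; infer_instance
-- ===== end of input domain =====

-- B replaces A's dict-of-buckets grouping by one stable sort of (value, index) pairs keyed on -value (objective: simpler).

-- ===== PORT A =====
-- 'if sums[i] not in sum_map: sum_map[sums[i]] = []' followed by 'sum_map[sums[i]].append(i)'
-- is exactly Dict.modify with default [] (insert-if-absent, then append; exact).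
-- sum_map (the dict-building loop over range(len(sums))):
def pv_sum_map (sums : List Int) : PySem.Dict Int (List Int) :=
  (PySem.List.pyRange 0 (PySem.List.len sums)).foldl
    (fun d i => d.modify (PySem.List.pyGetD sums i 0) [] (fun b => b ++ [i]))
    PySem.Dict.empty

-- 'sorted(list(sum_map), reverse=True)': list(dict) is its keys in insertion order
def get_ordered_tuples (sums : List Int) : List (Int × Int) :=
  (PySem.List.sorted (pv_sum_map sums).keys (fun v => v) true).foldl
    (fun acc v => acc ++ ((pv_sum_map sums).getD v []).map (fun index => (v, index)))
    []

-- ===== PORT B =====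
def get_ordered_tuples_alt (sums : List Int) : List (Int × Int) :=
  PySem.List.sorted ((PySem.List.enumerate sums).map (fun p => (p.2, p.1))) (fun p => -p.1) false

-- ===== PRECONDITION & SPEC =====
def Spec_get_ordered_tuples (sums : List Int) (out : List (Int × Int)) : Prop := out = get_ordered_tuples_alt sums
instance (sums : List Int) (out : List (Int × Int)) : Decidable (Spec_get_ordered_tuples sums out) := by unfold Spec_get_ordered_tuples; infer_instance

-- ===== CLAIM (what is proved, stated in full; the proofs are below) =====
def Claim_equal_get_ordered_tuples : Prop := ∀ (sums : List Int), Dom_get_ordered_tuples sums → Spec_get_ordered_tuples sums (get_ordered_tuples sums)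

-- ===== LEMMAS AND PROOFS =====

-- insertBy passes over every element it does not go before
theorem pv_insertBy_append_left {α : Type} (bf : α → α → Bool) (x : α) (l r : List α)
    (h : ∀ y ∈ l, bf x y = false) :
    PySem.List.insertBy bf x (l ++ r) = l ++ PySem.List.insertBy bf x r := by
  induction l with
  | nil => simp
  | cons y t ih =>
      have hy : bf x y = false := h y (by simp)
      simp [PySem.List.insertBy, hy, ih (fun z hz => h z (by simp [hz]))]

-- insertBy puts x in front when the list is empty or x goes before the head
theorem pv_insertBy_front {α : Type} (bf : α → α → Bool) (x : α) (r : List α)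
    (h : r = [] ∨ ∃ y t, r = y :: t ∧ bf x y = true) :
    PySem.List.insertBy bf x r = x :: r := by
  rcases h with h | ⟨y, t, rfl, hy⟩
  · subst h; simp [PySem.List.insertBy]
  · simp [PySem.List.insertBy, hy]

theorem pv_flatMap_congr_mem {α β : Type} (l : List α) (F G : α → List β)
    (h : ∀ a ∈ l, F a = G a) : l.flatMap F = l.flatMap G := by
  induction l with
  | nil => rfl
  | cons a t ih =>
      simp [List.flatMap_cons, h a (by simp), ih (fun b hb => h b (by simp [hb]))]

-- Stable sort = concatenation of key-buckets taken in increasing key order.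
theorem pv_sorted_buckets {α : Type} (key : α → Int) (ks : List Int)
    (hks : ks.Pairwise (· < ·)) :
    ∀ xs : List α, (∀ a ∈ xs, key a ∈ ks) →
      PySem.List.sorted xs key false = ks.flatMap (fun k => xs.filter (fun a => key a == k)) := by
  intro xs
  induction xs using List.reverseRecOn with
  | nil => simp [PySem.List.sorted]
  | append_singleton xs x ih =>
      intro hsub
      have hx : key x ∈ ks := hsub x (by simp)
      obtain ⟨ks1, ks2, hks_eq⟩ := List.append_of_mem hx
      subst hks_eq
      rw [List.pairwise_append] at hks
      obtain ⟨h1, h2, h12⟩ := hks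
      rw [List.pairwise_cons] at h2
      obtain ⟨hlt2, h2'⟩ := h2
      have hlt1 : ∀ k ∈ ks1, k < key x := fun k hk => h12 k hk (key x) (by simp)
      set F : Int → List α := fun k => xs.filter (fun a => key a == k) with hF
      have hIH := ih (fun a ha => hsub a (List.mem_append_left _ ha))
      have hfold : PySem.List.sorted (xs ++ [x]) key false
          = PySem.List.insertBy (fun a b => decide (key a < key b)) x (PySem.List.sorted xs key false) := by
        rw [PySem.List.sorted_eq_foldl_insertBy (xs ++ [x]) key,
            PySem.List.sorted_eq_foldl_insertBy xs key, List.foldl_append]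
        rfl
      rw [hfold, hIH]
      have hmem1 : ∀ y ∈ ks1.flatMap F, (decide (key x < key y)) = false := by
        intro y hy
        rcases List.mem_flatMap.mp hy with ⟨k, hk, hyk⟩
        have hke : key y = k := by simpa using (List.mem_filter.mp hyk).2
        simp only [decide_eq_false_iff_not, not_lt, hke]
        exact le_of_lt (hlt1 k hk)
      have hmem2 : ∀ y ∈ F (key x), (decide (key x < key y)) = false := by
        intro y hy
        have hke : key y = key x := by simpa using (List.mem_filter.mp hy).2
        simp [hke]
      rw [List.flatMap_append, List.flatMap_cons]
      rw [show ks1.flatMap F ++ (F (key x) ++ ks2.flatMap F)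
            = (ks1.flatMap F ++ F (key x)) ++ ks2.flatMap F by simp [List.append_assoc]]
      rw [pv_insertBy_append_left _ _ _ _ (by
        intro y hy
        rcases List.mem_append.mp hy with h | h
        exacts [hmem1 y h, hmem2 y h])]
      have hfront : PySem.List.insertBy (fun a b => decide (key a < key b)) x (ks2.flatMap F)
          = x :: ks2.flatMap F := by
        apply pv_insertBy_front
        cases hcase : ks2.flatMap F with
        | nil => exact Or.inl rfl
        | cons y t =>
            refine Or.inr ⟨y, t, rfl, ?_⟩
            have hy : y ∈ ks2.flatMap F := by rw [hcase]; simp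
            rcases List.mem_flatMap.mp hy with ⟨k, hk, hyk⟩
            have hke : key y = k := by simpa using (List.mem_filter.mp hyk).2
            simp only [decide_eq_true_eq, hke]
            exact hlt2 k hk
      rw [hfront]
      have hR1 : ks1.flatMap (fun k => (xs ++ [x]).filter (fun a => key a == k)) = ks1.flatMap F := by
        apply pv_flatMap_congr_mem
        intro k hk
        have hne : ((key x == k) : Bool) = false := by
          simp only [beq_eq_false_iff_ne, ne_eq]
          exact ne_of_gt (hlt1 k hk)
        rw [List.filter_append]
        simp [hne, hF]
      have hR2 : ks2.flatMap (fun k => (xs ++ [x]).filter (fun a => key a == k)) = ks2.flatMap F := by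
        apply pv_flatMap_congr_mem
        intro k hk
        have hne : ((key x == k) : Bool) = false := by
          simp only [beq_eq_false_iff_ne, ne_eq]
          exact ne_of_lt (hlt2 k hk)
        rw [List.filter_append]
        simp [hne, hF]
      have hRm : (xs ++ [x]).filter (fun a => key a == key x) = F (key x) ++ [x] := by
        rw [List.filter_append]
        simp [hF]
      rw [List.flatMap_append, List.flatMap_cons, hR1, hR2, hRm]
      simp [List.append_assoc]

-- the (value, index) pair list, in closed range form
def pvPairs (sums : List Int) : List (Int × Int) :=
  (List.range sums.length).map (fun k => (sums.getD k 0, (k : Int)))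

theorem pv_enumerate_aux (xs : List Int) :
    ∀ s : Int, (PySem.List.enumerate xs s).map (fun p => (p.2, p.1))
      = (List.range xs.length).map (fun k => (xs.getD k 0, (s + k : Int))) := by
  induction xs with
  | nil => intro s; simp [PySem.List.enumerate]
  | cons x t ih =>
      intro s
      simp only [PySem.List.enumerate, List.map_cons, List.length_cons,
        List.range_succ_eq_map, List.map_map, ih (s + 1)]
      refine congrArg₂ _ (by simp) (List.map_congr_left ?_)
      intro k _
      simp only [Function.comp, List.getD_cons_succ, Prod.mk.injEq]
      exact ⟨trivial, by push_cast; ring⟩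

theorem pv_enumerate_swap (sums : List Int) :
    (PySem.List.enumerate sums).map (fun p => (p.2, p.1)) = pvPairs sums := by
  unfold pvPairs
  rw [pv_enumerate_aux sums 0]
  exact List.map_congr_left (fun k _ => by simp)

theorem pv_map_fst_pairs (sums : List Int) :
    (pvPairs sums).map (fun p => p.1) = sums := by
  unfold pvPairs
  rw [List.map_map]
  apply List.ext_getElem (by simp)
  intro i h1 h2
  simp [List.getD_eq_getElem?_getD, List.getElem?_eq_getElem h2]

theorem pv_mem_pairs_fst {sums : List Int} {p : Int × Int} (hp : p ∈ pvPairs sums) :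
    p.1 ∈ sums := by
  unfold pvPairs at hp
  rcases List.mem_map.mp hp with ⟨k, hk, rfl⟩
  simp only [List.mem_range] at hk
  have : sums.getD k 0 = sums[k] := by
    simp [List.getD_eq_getElem?_getD, List.getElem?_eq_getElem hk]
  simp only [this]
  exact List.getElem_mem hk

theorem get_ordered_tuples_eq (sums : List Int) :
    get_ordered_tuples sums = get_ordered_tuples_alt sums := by
  unfold get_ordered_tuples get_ordered_tuples_alt pv_sum_map
  rw [pv_enumerate_swap]
  -- the dict-building loop, re-indexed over the (value, index) pair list
  have hdict : (PySem.List.pyRange 0 (PySem.List.len sums)).foldl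
      (fun d i => d.modify (PySem.List.pyGetD sums i 0) [] (fun b => b ++ [i])) PySem.Dict.empty
    = (pvPairs sums).foldl (fun d p => d.modify p.1 [] (fun b => b ++ [p.2])) PySem.Dict.empty := by
    rw [show PySem.List.len sums = ((sums.length : Nat) : Int) from rfl,
        PySem.List.pyRange_zero_nat, List.foldl_map]
    unfold pvPairs
    rw [List.foldl_map]
    simp
  rw [hdict]
  have hkeys : ((pvPairs sums).foldl (fun d p => d.modify p.1 [] (fun b => b ++ [p.2]))
      (PySem.Dict.empty : PySem.Dict Int (List Int))).keys = PySem.Set.ofList sums := by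
    rw [PySem.Dict.keys_foldl_modify_key (pvPairs sums) (fun p => p.1) [] (fun _ p b => b ++ [p.2])]
    rw [pv_map_fst_pairs]
    rfl
  rw [hkeys]
  -- the name of the descending distinct-value list
  set K := PySem.List.sorted (PySem.Set.ofList sums) (fun v => v) true with hK
  have hbucket : ∀ v : Int, ((pvPairs sums).foldl (fun d p => d.modify p.1 [] (fun b => b ++ [p.2]))
      (PySem.Dict.empty : PySem.Dict Int (List Int))).getD v []
      = ((pvPairs sums).filter (fun p => p.1 == v)).map (fun p => p.2) := by
    intro v
    rw [PySem.Dict.getD_foldl_modify_append (pvPairs sums) PySem.Dict.empty v]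
    rfl
  -- A's output as a flatMap of buckets
  rw [PySem.List.foldl_append_eq_flatMap]
  have hA : ∀ v ∈ K, (((pvPairs sums).foldl (fun d p => d.modify p.1 [] (fun b => b ++ [p.2]))
        (PySem.Dict.empty : PySem.Dict Int (List Int))).getD v []).map (fun index => (v, index))
      = (pvPairs sums).filter (fun p => p.1 == v) := by
    intro v _
    rw [hbucket v, List.map_map]
    calc ((pvPairs sums).filter (fun p => p.1 == v)).map ((fun index => (v, index)) ∘ fun p => p.2)
        = ((pvPairs sums).filter (fun p => p.1 == v)).map id := by
          apply List.map_congr_left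
          intro p hp
          have : p.1 = v := by simpa using (List.mem_filter.mp hp).2
          simp [Function.comp, ← this]
      _ = (pvPairs sums).filter (fun p => p.1 == v) := List.map_id _
  rw [List.nil_append, pv_flatMap_congr_mem K _ _ hA]
  -- K is strictly descending
  have hdesc : K.Pairwise (fun a b => b < a) := by
    have hge := PySem.List.sorted_pairwise_rev (PySem.Set.ofList sums) (fun v => v)
    have hnd : K.Nodup := ((PySem.List.sorted_perm (PySem.Set.ofList sums) (fun v => v) true).symm).nodup
      (PySem.Set.nodup_ofList sums)
    exact (hge.and hnd).imp (fun h => lt_of_le_of_ne h.1 (Ne.symm h.2))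
  -- B's stable sort, bucketed over the negated keys
  have hsubB : ∀ p ∈ pvPairs sums, (fun q : Int × Int => -q.1) p ∈ K.map (fun v => -v) := by
    intro p hp
    refine List.mem_map.mpr ⟨p.1, ?_, rfl⟩
    rw [hK, PySem.List.mem_sorted]
    exact (PySem.Set.mem_ofList _ _).mpr (pv_mem_pairs_fst hp)
  have hB := pv_sorted_buckets (fun q : Int × Int => -q.1) (K.map (fun v => -v))
    (hdesc.map _ (fun h => by omega)) (pvPairs sums) hsubB
  rw [hB, List.flatMap_map]
  apply pv_flatMap_congr_mem
  intro v _
  apply List.filter_congr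
  intro p _
  simp [neg_inj]

-- ===== VERDICT (by name: the statement is the Claim_ definition above) =====
theorem get_ordered_tuples_spec : Claim_equal_get_ordered_tuples := by
  intro sums _
  unfold Spec_get_ordered_tuples
  exact get_ordered_tuples_eq sums
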